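-- pv_equiv track=rewrite | github.com/alzhu1/advent-of-code | 2015/python/day20/solution2.py | get_factors
-- ===== SOURCE A (Python) =====
-- import math
--
-- def get_factors(num):
--     limit = math.floor(math.sqrt(num))
--     factors = set()
--     for i in range(1, limit + 1):
--         if num % i == 0:
--             if i * 50 >= num:
--                 factors.add(i)
--
--             if int(num / i) * 50 >= num:
--                 factors.add(int(num / i))
--     return factors
-- ===== SOURCE B (Python) =====
-- def get_factors(num):
--     # d*50 >= num  <=>  the cofactor j = num//d is at most 50.  Stage 1: list the
--     # cofactors j in 1..min(num, 50) that divide num.  Stage 2: the factors are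
--     # their quotients num//j (a set, matching A's return type).
--     cofactors = [j for j in range(1, min(num, 50) + 1) if num % j == 0]
--     return set(num // j for j in cofactors)
-- ===== Notes on version B (the rewrite author's own statement) =====
-- stated objective: alternative
-- what changed: Instead of scanning candidate divisors i up to sqrt(num) and filter-adding i and int(num/i) under i*50>=num conditions inside one loop, B works in two staged passes on the cofactor side: it first filters the at most 50 cofactors j in 1..min(num,50) that divide num, then maps each to num//j and collects the results into a set.
import Mathlib
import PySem

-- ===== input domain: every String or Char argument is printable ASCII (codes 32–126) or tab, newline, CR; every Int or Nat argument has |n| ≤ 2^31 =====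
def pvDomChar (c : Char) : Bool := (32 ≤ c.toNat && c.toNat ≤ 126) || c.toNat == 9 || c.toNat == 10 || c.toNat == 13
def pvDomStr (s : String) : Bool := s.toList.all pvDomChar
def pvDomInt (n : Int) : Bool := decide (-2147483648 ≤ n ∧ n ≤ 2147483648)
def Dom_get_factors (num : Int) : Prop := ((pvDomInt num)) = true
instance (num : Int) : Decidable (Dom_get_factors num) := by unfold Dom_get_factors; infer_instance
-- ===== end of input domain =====

-- B replaces A's single divisor-scan loop up to sqrt(num) by two staged passes on the
-- cofactor side: filter the at most 50 cofactors j in 1..min(num,50) dividing num, then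
-- map each to num//j and collect into a set; same set of divisors.
-- Both Pythons return a set; Python's set iteration order is not modelled, so both ports
-- render the set canonically as its sorted element list.

-- ===== PORT A =====
-- loop body of A: 'if num % i == 0: (maybe add i) (maybe add int(num/i))'
def stepA (num : Int) (s : PySem.Set Int) (i : Int) : PySem.Set Int :=
  if PySem.Int.mod num i = 0 then
    let s1 := if i * 50 ≥ num then PySem.Set.add s i else s
    if PySem.Int.truncdiv num i * 50 ≥ num then PySem.Set.add s1 (PySem.Int.truncdiv num i) else s1
  else s

def get_factors (num : Int) : List Int :=
  -- math.floor(math.sqrt(num)): exact for 0 ≤ num ≤ 2^31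
  let limit : Int := (Nat.sqrt num.toNat : Int)
  let factors : PySem.Set Int :=
    (PySem.List.pyRange 1 (limit + 1) 1).foldl (stepA num) PySem.Set.empty
  PySem.List.sorted factors (fun x => x)

-- ===== PORT B =====
def get_factors_alt (num : Int) : List Int :=
  -- stage 1: cofactors = [j for j in range(1, min(num, 50) + 1) if num % j == 0]
  let cofactors : List Int :=
    (PySem.List.pyRange 1 (min num 50 + 1) 1).filter (fun j => PySem.Int.mod num j == 0)
  -- stage 2: set(num // j for j in cofactors)
  let factors : PySem.Set Int :=
    PySem.Set.ofList (cofactors.map (fun j => PySem.Int.floordiv num j))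
  PySem.List.sorted factors (fun x => x)

-- ===== PRECONDITION & SPEC =====
-- A raises ValueError (math.sqrt of a negative) for num < 0; Pre_ excludes exactly those inputs.
def Pre_get_factors (num : Int) : Prop := 0 ≤ num
instance (num : Int) : Decidable (Pre_get_factors num) := by unfold Pre_get_factors; infer_instance
def pvWitness_get_factors : Int := 50

def Spec_get_factors (num : Int) (out : List Int) : Prop := out = get_factors_alt num
instance (num : Int) (out : List Int) : Decidable (Spec_get_factors num out) := by unfold Spec_get_factors; infer_instance

-- ===== CLAIM (what is proved, stated in full; the proofs are below) =====
def Claim_equal_get_factors : Prop := ∀ (num : Int), Dom_get_factors num → Pre_get_factors num → Spec_get_factors num (get_factors num)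

-- ===== LEMMAS AND PROOFS =====

-- the common value: divisors d of num with d*50 ≥ num
def GoodDiv (num d : Int) : Prop := d ∣ num ∧ 1 ≤ d ∧ num ≤ 50 * d

theorem one_le_cofactor {n a c : Int} (hn : 1 ≤ n) (ha : 0 ≤ a) (h : n = a * c) : 1 ≤ c := by
  by_cases h0 : 1 ≤ c
  · exact h0
  · exfalso
    have h2 : a * c ≤ a * 0 := mul_le_mul_of_nonneg_left (by omega) ha
    simp only [mul_zero] at h2
    linarith

theorem mem_stepA (num : Int) (s : PySem.Set Int) (i d : Int) :
    d ∈ stepA num s i ↔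
      d ∈ s ∨ (PySem.Int.mod num i = 0 ∧
        ((d = i ∧ num ≤ i * 50) ∨ (d = PySem.Int.truncdiv num i ∧ num ≤ PySem.Int.truncdiv num i * 50))) := by
  unfold stepA
  split_ifs with hm h1 h2 <;> simp [PySem.Set.mem_add, hm] <;> tauto

theorem mem_foldl_stepA (num : Int) (l : List Int) (s : PySem.Set Int) (d : Int) :
    d ∈ l.foldl (stepA num) s ↔
      d ∈ s ∨ ∃ i ∈ l, PySem.Int.mod num i = 0 ∧
        ((d = i ∧ num ≤ i * 50) ∨ (d = PySem.Int.truncdiv num i ∧ num ≤ PySem.Int.truncdiv num i * 50)) := by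
  induction l generalizing s with
  | nil => simp
  | cons a l ih =>
    rw [List.foldl_cons, ih, mem_stepA]
    constructor
    · rintro ((h | h) | ⟨i, hi, hrest⟩)
      · exact Or.inl h
      · exact Or.inr ⟨a, List.mem_cons_self, h⟩
      · exact Or.inr ⟨i, List.mem_cons_of_mem _ hi, hrest⟩
    · rintro (h | ⟨i, hi, hrest⟩)
      · exact Or.inl (Or.inl h)
      · rcases List.mem_cons.mp hi with rfl | hi'
        · exact Or.inl (Or.inr hrest)
        · exact Or.inr ⟨i, hi', hrest⟩

theorem nodup_foldl_stepA (num : Int) (l : List Int) (s : PySem.Set Int) (hs : s.Nodup) :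
    (l.foldl (stepA num) s).Nodup := by
  induction l generalizing s with
  | nil => simpa
  | cons a l ih =>
    refine ih _ ?_
    unfold stepA
    split_ifs <;> first
      | exact PySem.Set.nodup_add _ _ (PySem.Set.nodup_add _ _ hs)
      | exact PySem.Set.nodup_add _ _ hs
      | exact hs

theorem A_iff_good (num d : Int) (h1 : 1 ≤ num) :
    (∃ i ∈ PySem.List.pyRange 1 ((Nat.sqrt num.toNat : Int) + 1) 1, PySem.Int.mod num i = 0 ∧
        ((d = i ∧ num ≤ i * 50) ∨ (d = PySem.Int.truncdiv num i ∧ num ≤ PySem.Int.truncdiv num i * 50)))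
      ↔ GoodDiv num d := by
  have h0 : ((num.toNat : Int)) = num := Int.toNat_of_nonneg (by omega)
  have hA := Nat.sqrt_le' num.toNat
  have hB := Nat.lt_succ_sqrt' num.toNat
  have hA' : ((Nat.sqrt num.toNat : Int)) * (Nat.sqrt num.toNat : Int) ≤ num := by
    have : ((Nat.sqrt num.toNat : Int)) ^ 2 ≤ (num.toNat : Int) := by exact_mod_cast hA
    rw [pow_two] at this
    linarith
  have hB' : num < ((Nat.sqrt num.toNat : Int) + 1) * ((Nat.sqrt num.toNat : Int) + 1) := by
    have : (num.toNat : Int) < ((Nat.sqrt num.toNat : Int) + 1) ^ 2 := by exact_mod_cast hB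
    rw [pow_two] at this
    linarith
  set S : Int := (Nat.sqrt num.toNat : Int) with hSdef
  have hS0 : 0 ≤ S := Int.natCast_nonneg _
  constructor
  · rintro ⟨i, hir, hmod, hcase⟩
    rw [PySem.List.mem_pyRange_one] at hir
    obtain ⟨hi1, hi2⟩ := hir
    obtain ⟨c, hc⟩ := (PySem.Int.mod_eq_zero_iff_dvd num i).mp hmod
    have hcpos : 1 ≤ c := one_le_cofactor h1 (by omega) hc
    have htd : PySem.Int.truncdiv num i = c := by
      unfold PySem.Int.truncdiv
      rw [Int.tdiv_eq_ediv_of_nonneg (by omega), hc, Int.mul_ediv_cancel_left _ (by omega)]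
    rcases hcase with ⟨rfl, hle⟩ | ⟨rfl, hle⟩
    · exact ⟨⟨c, hc⟩, by omega, by linarith⟩
    · rw [htd] at hle ⊢
      exact ⟨⟨i, by rw [hc]; ring⟩, hcpos, by linarith⟩
  · rintro ⟨⟨c, hc⟩, hd1, hd50⟩
    have hc1 : 1 ≤ c := one_le_cofactor h1 (by omega) hc
    by_cases hdS : d ≤ S
    · refine ⟨d, ?_, (PySem.Int.mod_eq_zero_iff_dvd num d).mpr ⟨c, hc⟩, Or.inl ⟨rfl, by linarith⟩⟩
      rw [PySem.List.mem_pyRange_one]; omega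
    · have hdS' : S < d := by omega
      have hcS : c ≤ S := by
        by_contra hcS'
        have hcS'' : S < c := by omega
        have hq : (S + 1) * (S + 1) ≤ d * c := mul_le_mul (by omega) (by omega) (by omega) (by omega)
        linarith
      have htd : PySem.Int.truncdiv num c = d := by
        unfold PySem.Int.truncdiv
        rw [Int.tdiv_eq_ediv_of_nonneg (by omega), hc, mul_comm, Int.mul_ediv_cancel_left _ (by omega)]
      refine ⟨c, ?_, (PySem.Int.mod_eq_zero_iff_dvd num c).mpr ⟨d, by rw [hc]; ring⟩,
        Or.inr ⟨htd.symm, by rw [htd]; linarith⟩⟩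
      rw [PySem.List.mem_pyRange_one]; omega

theorem B_iff_good (num d : Int) (h1 : 1 ≤ num) :
    (∃ j ∈ PySem.List.pyRange 1 (min num 50 + 1) 1, PySem.Int.mod num j = 0 ∧ d = PySem.Int.floordiv num j)
      ↔ GoodDiv num d := by
  constructor
  · rintro ⟨j, hjr, hmod, rfl⟩
    rw [PySem.List.mem_pyRange_one] at hjr
    obtain ⟨hj1, hj2⟩ := hjr
    have hj50 : j ≤ 50 := by omega
    obtain ⟨c, hc⟩ := (PySem.Int.mod_eq_zero_iff_dvd num j).mp hmod
    have hc1 : 1 ≤ c := one_le_cofactor h1 (by omega) hc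
    have hfd : PySem.Int.floordiv num j = c := by
      rw [PySem.Int.floordiv_eq_ediv_of_pos (by omega), hc, Int.mul_ediv_cancel_left _ (by omega)]
    rw [hfd]
    refine ⟨⟨j, by rw [hc]; ring⟩, hc1, ?_⟩
    have : j * c ≤ 50 * c := mul_le_mul_of_nonneg_right hj50 (by omega)
    linarith
  · rintro ⟨⟨c, hc⟩, hd1, hd50⟩
    have hc1 : 1 ≤ c := one_le_cofactor h1 (by omega) hc
    have hc' : num = c * d := by rw [hc]; ring
    have hc50 : c ≤ 50 := by
      by_contra h'
      have h'' : 51 ≤ c := by omega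
      have : 51 * d ≤ c * d := mul_le_mul_of_nonneg_right (by omega) (by omega)
      linarith
    have hcnum : c ≤ num := by
      have : c * 1 ≤ c * d := mul_le_mul_of_nonneg_left hd1 (by omega)
      linarith
    have hfd : PySem.Int.floordiv num c = d := by
      rw [PySem.Int.floordiv_eq_ediv_of_pos (by omega), hc', Int.mul_ediv_cancel_left _ (by omega)]
    refine ⟨c, ?_, (PySem.Int.mod_eq_zero_iff_dvd num c).mpr ⟨d, hc'⟩, hfd.symm⟩
    rw [PySem.List.mem_pyRange_one]; omega

-- membership in B's staged filter-map pipeline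
theorem mem_B_pipeline (num d : Int) :
    d ∈ PySem.Set.ofList (((PySem.List.pyRange 1 (min num 50 + 1) 1).filter
        (fun j => PySem.Int.mod num j == 0)).map (fun j => PySem.Int.floordiv num j)) ↔
      ∃ j ∈ PySem.List.pyRange 1 (min num 50 + 1) 1,
        PySem.Int.mod num j = 0 ∧ d = PySem.Int.floordiv num j := by
  rw [PySem.Set.mem_ofList, List.mem_map]
  constructor
  · rintro ⟨j, hj, rfl⟩
    obtain ⟨hjr, hjm⟩ := List.mem_filter.mp hj
    exact ⟨j, hjr, by simpa using hjm, rfl⟩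
  · rintro ⟨j, hjr, hjm, rfl⟩
    exact ⟨j, List.mem_filter.mpr ⟨hjr, by simpa using hjm⟩, rfl⟩

-- ===== VERDICT (by name: the statement is the Claim_ definition above) =====
theorem get_factors_spec : Claim_equal_get_factors := by
  intro num _ hpre
  unfold Spec_get_factors
  simp only [get_factors, get_factors_alt]
  by_cases h0 : num = 0
  · subst h0; decide
  · have h1 : 1 ≤ num := by unfold Pre_get_factors at hpre; omega
    have hnA := nodup_foldl_stepA num (PySem.List.pyRange 1 ((Nat.sqrt num.toNat : Int) + 1) 1)
      PySem.Set.empty (by simp [PySem.Set.empty])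
    have hnB := PySem.Set.nodup_ofList (((PySem.List.pyRange 1 (min num 50 + 1) 1).filter
        (fun j => PySem.Int.mod num j == 0)).map (fun j => PySem.Int.floordiv num j))
    have hperm : (PySem.Set.ofList (((PySem.List.pyRange 1 (min num 50 + 1) 1).filter
          (fun j => PySem.Int.mod num j == 0)).map (fun j => PySem.Int.floordiv num j))).Perm
        ((PySem.List.pyRange 1 ((Nat.sqrt num.toNat : Int) + 1) 1).foldl (stepA num) PySem.Set.empty) := by
      rw [List.perm_ext_iff_of_nodup hnB hnA]
      intro a
      rw [mem_foldl_stepA, mem_B_pipeline]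
      simp only [PySem.Set.empty, List.not_mem_nil, false_or]
      rw [A_iff_good num a h1, B_iff_good num a h1]
    exact PySem.List.sorted_id_eq_of_perm_of_pairwise _ _
      ((PySem.List.sorted_perm _ _ _).trans hperm)
      (PySem.List.sorted_pairwise _ _)
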